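-- pv_equiv track=rewrite | github.com/Spar7k/LinguaSub-demo | backend/app/transcription_service.py | _split_on_breaks
-- ===== SOURCE A (Python) =====
-- def _split_on_breaks(text: str, break_chars: str) -> list[str]:
--     pieces: list[str] = []
--     buffer: list[str] = []
--     for character in text:
--         buffer.append(character)
--         if character in break_chars:
--             piece = "".join(buffer).strip()
--             if piece:
--                 pieces.append(piece)
--             buffer = []
--
--     trailing_piece = "".join(buffer).strip()
--     if trailing_piece:
--         pieces.append(trailing_piece)
--     return pieces or [text.strip()]
-- ===== SOURCE B (Python) =====
-- def _first_break(s: str, break_chars: str):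
--     for i, ch in enumerate(s):
--         if ch in break_chars:
--             return i
--     return None
--
--
-- def _split_on_breaks(text: str, break_chars: str) -> list[str]:
--     pieces: list[str] = []
--     rest = text
--     while rest:
--         i = _first_break(rest, break_chars)
--         if i is None:
--             break
--         piece = rest[:i + 1].strip()
--         if piece:
--             pieces.append(piece)
--         rest = rest[i + 1:]
--     tail = rest.strip()
--     if tail:
--         pieces.append(tail)
--     return pieces or [text.strip()]
-- ===== Notes on version B (the rewrite author's own statement) =====
-- stated objective: alternative
-- what changed: B replaces A's char-by-char buffer accumulation with a jump-to-next-break loop: it finds the index of the next break character, slices off rest[:i+1], strips it, and recurses on the remainder; no per-character buffer is maintained.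
import Mathlib
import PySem

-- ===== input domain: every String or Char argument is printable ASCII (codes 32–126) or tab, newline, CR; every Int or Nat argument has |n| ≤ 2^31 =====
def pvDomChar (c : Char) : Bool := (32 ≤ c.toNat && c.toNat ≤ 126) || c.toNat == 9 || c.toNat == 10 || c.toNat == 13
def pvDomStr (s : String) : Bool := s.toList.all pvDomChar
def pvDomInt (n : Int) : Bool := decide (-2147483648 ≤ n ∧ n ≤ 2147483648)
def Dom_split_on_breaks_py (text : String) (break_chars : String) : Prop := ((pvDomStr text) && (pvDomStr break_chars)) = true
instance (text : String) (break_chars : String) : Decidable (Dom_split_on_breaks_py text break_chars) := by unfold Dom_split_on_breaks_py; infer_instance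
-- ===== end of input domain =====

-- B replaces A's char-by-char buffer accumulation with a jump-to-next-break loop slicing
-- off rest[:i+1] piece by piece (alternative decomposition, same cost).

-- ===== PORT A =====
-- one loop step of A: append the char to the buffer; on a break char flush the stripped buffer
def aStep (bks : List Char) (st : List String × List Char) (c : Char) : List String × List Char :=
  let buf := st.2 ++ [c]
  if bks.contains c then
    let piece := PySem.Chars.strip buf
    (if piece ≠ [] then st.1 ++ [String.ofList piece] else st.1, [])
  else (st.1, buf)

def split_on_breaks_py (text : String) (break_chars : String) : List String :=
  let st := text.toList.foldl (aStep break_chars.toList) ([], [])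
  let trailing := PySem.Chars.strip st.2     -- "".join(buffer).strip()
  let pieces := if trailing ≠ [] then st.1 ++ [String.ofList trailing] else st.1
  if pieces = [] then [String.ofList (PySem.Chars.strip text.toList)] else pieces

-- ===== PORT B =====
-- helper _first_break: index of the first break character, None if there is none
def firstBreak (bks : List Char) : List Char → Option Nat
  | [] => none
  | c :: cs => if bks.contains c then some 0 else (firstBreak bks cs).map (· + 1)

-- the while loop of B: slice off rest[:i+1] (nonnegative in-range slice bounds = take/drop, exact),
-- strip it, append if non-empty, continue on rest[i+1:]
def bLoop (bks : List Char) (rest : List Char) (pieces : List String) : List String × List Char :=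
  if h : rest = [] then (pieces, rest)  -- while-condition: stop on empty rest
  else
    match firstBreak bks rest with
    | none => (pieces, rest)
    | some i =>
      let piece := PySem.Chars.strip (rest.take (i + 1))
      bLoop bks (rest.drop (i + 1)) (if piece ≠ [] then pieces ++ [String.ofList piece] else pieces)
termination_by rest.length
decreasing_by
  simp only [List.length_drop]
  have : rest.length ≠ 0 := fun h0 => h (List.eq_nil_of_length_eq_zero h0)
  omega

def split_on_breaks_py_alt (text : String) (break_chars : String) : List String :=
  let st := bLoop break_chars.toList text.toList []
  let tail := PySem.Chars.strip st.2
  let pieces := if tail ≠ [] then st.1 ++ [String.ofList tail] else st.1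
  if pieces = [] then [String.ofList (PySem.Chars.strip text.toList)] else pieces

-- ===== PRECONDITION & SPEC =====
def Spec_split_on_breaks_py (text : String) (break_chars : String) (out : List String) : Prop := out = split_on_breaks_py_alt text break_chars
instance (text : String) (break_chars : String) (out : List String) : Decidable (Spec_split_on_breaks_py text break_chars out) := by unfold Spec_split_on_breaks_py; infer_instance

-- ===== CLAIM (what is proved, stated in full; the proofs are below) =====
def Claim_equal_split_on_breaks_py : Prop := ∀ (text : String) (break_chars : String), Dom_split_on_breaks_py text break_chars → Spec_split_on_breaks_py text break_chars (split_on_breaks_py text break_chars)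

-- ===== LEMMAS AND PROOFS =====

theorem firstBreak_of_no_break (bks : List Char) (xs : List Char)
    (h : ∀ c ∈ xs, bks.contains c = false) : firstBreak bks xs = none := by
  induction xs with
  | nil => rfl
  | cons c cs ih =>
    simp only [firstBreak, h c (by simp)]
    simp [ih (fun d hd => h d (by simp [hd]))]

theorem firstBreak_append (bks : List Char) (buf : List Char) (c : Char) (rest : List Char)
    (hbuf : ∀ d ∈ buf, bks.contains d = false) (hc : bks.contains c = true) :
    firstBreak bks (buf ++ c :: rest) = some buf.length := by
  induction buf with
  | nil => simp only [List.nil_append, firstBreak, hc, if_true, List.length_nil]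
  | cons d ds ih =>
    simp only [List.cons_append, firstBreak, hbuf d (by simp)]
    simp [ih (fun e he => hbuf e (by simp [he]))]

theorem bLoop_no_break (bks : List Char) (rest : List Char) (pieces : List String)
    (h : ∀ c ∈ rest, bks.contains c = false) : bLoop bks rest pieces = (pieces, rest) := by
  rw [bLoop]
  rcases rest with _ | ⟨c, cs⟩
  · simp
  · simp [firstBreak_of_no_break bks _ h]

theorem bLoop_break (bks : List Char) (buf : List Char) (c : Char) (cs : List Char)
    (pieces : List String)
    (hbuf : ∀ d ∈ buf, bks.contains d = false) (hc : bks.contains c = true) :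
    bLoop bks (buf ++ c :: cs) pieces =
      bLoop bks cs
        (if PySem.Chars.strip (buf ++ [c]) ≠ [] then
           pieces ++ [String.ofList (PySem.Chars.strip (buf ++ [c]))]
         else pieces) := by
  rw [bLoop]
  have hne : buf ++ c :: cs ≠ [] := by simp
  simp only [hne, dite_false, firstBreak_append bks buf c cs hbuf hc]
  have htake : (buf ++ c :: cs).take (buf.length + 1) = buf ++ [c] := by
    simp [List.take_append]
  have hdrop : (buf ++ c :: cs).drop (buf.length + 1) = cs := by
    simp [List.drop_append]
  simp [htake, hdrop]

-- loop invariant: A's fold from (pieces, buf) over cs equals B's loop on buf ++ cs,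
-- provided the pending buffer contains no break character
theorem foldl_eq_bLoop (bks : List Char) (cs : List Char) :
    ∀ (pieces : List String) (buf : List Char),
      (∀ d ∈ buf, bks.contains d = false) →
      cs.foldl (aStep bks) (pieces, buf) = bLoop bks (buf ++ cs) pieces := by
  induction cs with
  | nil =>
    intro pieces buf hbuf
    simp [bLoop_no_break bks buf pieces hbuf]
  | cons c cs ih =>
    intro pieces buf hbuf
    by_cases hc : bks.contains c = true
    · simp only [List.foldl_cons, aStep, hc, if_true]
      rw [ih _ [] (by simp)]
      rw [bLoop_break bks buf c cs pieces hbuf hc]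
      simp
    · have hc' : bks.contains c = false := by simpa using hc
      simp only [List.foldl_cons, aStep, hc', Bool.false_eq_true, if_false]
      rw [ih pieces (buf ++ [c])
        (fun d hd => by rcases List.mem_append.mp hd with h | h
                        · exact hbuf d h
                        · simp at h; subst h; exact hc')]
      simp

-- ===== VERDICT (by name: the statement is the Claim_ definition above) =====
theorem split_on_breaks_py_spec : Claim_equal_split_on_breaks_py := by
  intro text break_chars _
  unfold Spec_split_on_breaks_py split_on_breaks_py split_on_breaks_py_alt
  rw [foldl_eq_bLoop break_chars.toList text.toList [] [] (by simp)]
  simp
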